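-- pv_equiv track=rewrite | github.com/sonz-ai/sonzai-python | benchmarks/locomo/backends/sonzai.py | _batch_messages
-- ===== SOURCE A (Python) =====
-- from collections.abc import Iterator
--
-- def _batch_messages(
--     messages: list[dict[str, str]], batch_size: int,
-- ) -> Iterator[list[dict[str, str]]]:
--     """Yield message batches respecting /process's >=2 constraint.
--
--     batch_size=0 → yield the whole list as one batch (if len>=2, else empty).
--     batch_size>=2 → chunk into size-`batch_size` pieces. If the last chunk
--     would be size-1, instead re-draw the final boundary so the last batch
--     is the last `batch_size` messages (overlapping by 1 with the previous
--     batch's tail). This ensures every batch has exactly `batch_size`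
--     messages and no size-1 batch is ever emitted. If n < 2, yield nothing.
--     """
--     n = len(messages)
--     if n < 2:
--         return
--     if batch_size <= 0:
--         yield messages
--         return
--     if batch_size < 2:
--         raise ValueError("batch_size must be 0 (whole session) or >=2")
--
--     # Normal chunking
--     i = 0
--     boundaries: list[tuple[int, int]] = []
--     while i < n:
--         boundaries.append((i, min(i + batch_size, n)))
--         i += batch_size
--
--     # If the last chunk is size-1 AND there's a previous chunk to anchor against,
--     # replace it with the last batch_size messages (overlapping with prev tail).
--     if len(boundaries) >= 2 and (boundaries[-1][1] - boundaries[-1][0]) == 1: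
--         boundaries[-1] = (n - batch_size, n)
--
--     for start, end in boundaries:
--         yield messages[start:end]
-- ===== SOURCE B (Python) =====
-- def _batch_messages(messages, batch_size):
--     if len(messages) < 2:
--         return
--     if batch_size <= 0:
--         yield messages
--         return
--     if batch_size < 2:
--         raise ValueError("batch_size must be 0 (whole session) or >=2")
--     rest = messages
--     while rest:
--         chunk, rest = rest[:batch_size], rest[batch_size:]
--         if len(rest) == 1:
--             # a size-1 final batch would remain: emit this chunk, then the
--             # overlapping final batch built from this chunk's tail + leftover
--             yield chunk
--             yield chunk[1:] + rest
--             return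
--         yield chunk
-- ===== Notes on version B (the rewrite author's own statement) =====
-- stated objective: alternative
-- what changed: B drops A's two-phase index scheme (build a boundaries list over indices, patch its last entry, then slice): it consumes the list itself, peeling one chunk off the shrinking remainder per step, and when exactly one element would remain it builds the overlapping final batch by concatenating the current chunk's tail with the leftover element -- no boundaries list, no index arithmetic, no patching.
import Mathlib
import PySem

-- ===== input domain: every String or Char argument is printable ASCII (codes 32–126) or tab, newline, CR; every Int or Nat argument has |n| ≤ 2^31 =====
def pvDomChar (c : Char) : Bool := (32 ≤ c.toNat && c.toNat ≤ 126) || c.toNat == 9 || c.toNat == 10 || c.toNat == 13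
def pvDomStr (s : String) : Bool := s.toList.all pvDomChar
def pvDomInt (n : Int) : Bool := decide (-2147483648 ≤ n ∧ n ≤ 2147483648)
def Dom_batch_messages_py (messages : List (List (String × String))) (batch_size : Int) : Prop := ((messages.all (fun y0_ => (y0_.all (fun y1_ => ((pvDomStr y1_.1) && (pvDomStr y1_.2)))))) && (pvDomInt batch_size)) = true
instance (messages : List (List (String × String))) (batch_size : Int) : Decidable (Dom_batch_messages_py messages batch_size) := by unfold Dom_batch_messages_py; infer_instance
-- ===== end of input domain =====

-- B replaces A's two-phase index scheme (build a boundaries list, patch its last entry,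
-- then slice) by consuming the list itself, peeling one chunk off the shrinking remainder
-- per step and, when exactly one element would remain, emitting the overlapping final
-- batch as the current chunk's tail concatenated with the leftover (objective: alternative;
-- equivalence of the generator's yielded sequence, collected as a list).

-- ===== PORT A =====
-- the while-loop building `boundaries`; fuel = messages.length bounds the iteration count
-- (each step advances i by batch_size ≥ 2, so at most n iterations occur).
def bmLoopA (fuel : Nat) (n bs i : Int) : List (Int × Int) :=
  match fuel with
  | 0 => []
  | fuel + 1 =>
    if i < n then (i, min (i + bs) n) :: bmLoopA fuel n bs (i + bs) else []

-- A's patch step: boundaries[-1] is read only under the `len(boundaries) >= 2` guard,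
-- so getLastD is exact
def bmPatch (n bs : Int) (bounds : List (Int × Int)) : List (Int × Int) :=
  if 2 ≤ bounds.length ∧ (bounds.getLastD (0, 0)).2 - (bounds.getLastD (0, 0)).1 = 1
  then bounds.dropLast ++ [(n - bs, n)] else bounds

def batch_messages_py (messages : List (List (String × String))) (batch_size : Int) : List (List (List (String × String))) :=
  let n : Int := messages.length
  if n < 2 then []
  else if batch_size ≤ 0 then [messages]
  else if batch_size < 2 then []   -- Python raises ValueError here; excluded by Pre_
  else
    (bmPatch n batch_size (bmLoopA messages.length n batch_size 0)).map
      (fun p => PySem.List.slice messages (some p.1) (some p.2))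

-- ===== PORT B =====
-- the while-loop peeling chunks off `rest`; fuel = messages.length bounds the iteration
-- count (each step removes batch_size ≥ 2 elements of rest, or returns).
def bmChunks (bs : Int) : Nat → List (List (String × String)) → List (List (List (String × String)))
  | _, [] => []
  | fuel + 1, rest =>
    let chunk := PySem.List.slice rest none (some bs)
    let rest' := PySem.List.slice rest (some bs) none
    if (rest'.length : Int) = 1 then
      [chunk, PySem.List.slice chunk (some 1) none ++ rest']
    else chunk :: bmChunks bs fuel rest'
  | 0, _ => []

def batch_messages_py_alt (messages : List (List (String × String))) (batch_size : Int) : List (List (List (String × String))) :=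
  if (messages.length : Int) < 2 then []
  else if batch_size ≤ 0 then [messages]
  else if batch_size < 2 then []   -- Python raises ValueError here; excluded by Pre_
  else bmChunks batch_size messages.length messages

-- ===== PRECONDITION & SPEC =====
-- Pre_ excludes exactly the inputs where A raises ValueError (>=2 messages with batch_size = 1);
-- B raises the same ValueError there.
def Pre_batch_messages_py (messages : List (List (String × String))) (batch_size : Int) : Prop :=
  ¬ (2 ≤ messages.length ∧ batch_size = 1)
instance (messages : List (List (String × String))) (batch_size : Int) : Decidable (Pre_batch_messages_py messages batch_size) := by unfold Pre_batch_messages_py; infer_instance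

def pvWitness_batch_messages_py : (List (List (String × String))) × Int :=
  ([[("role", "user")], [("role", "assistant")], [("role", "user")]], 2)

def Spec_batch_messages_py (messages : List (List (String × String))) (batch_size : Int) (out : List (List (List (String × String)))) : Prop := out = batch_messages_py_alt messages batch_size
instance (messages : List (List (String × String))) (batch_size : Int) (out : List (List (List (String × String)))) : Decidable (Spec_batch_messages_py messages batch_size out) := by unfold Spec_batch_messages_py; infer_instance

-- ===== CLAIM (what is proved, stated in full; the proofs are below) =====
def Claim_equal_batch_messages_py : Prop := ∀ (messages : List (List (String × String))) (batch_size : Int), Dom_batch_messages_py messages batch_size → Pre_batch_messages_py messages batch_size → Spec_batch_messages_py messages batch_size (batch_messages_py messages batch_size)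

-- ===== LEMMAS AND PROOFS =====

lemma bmLoopA_nil (fuel : Nat) (n bs i : Int) (h : n ≤ i) : bmLoopA fuel n bs i = [] := by
  cases fuel with
  | zero => rfl
  | succ f => rw [bmLoopA, if_neg (by omega)]

lemma bmLoopA_fuel (bs : Int) (hbs : 0 < bs) :
    ∀ (f1 f2 : Nat) (n i : Int), (n - i).toNat ≤ f1 → (n - i).toNat ≤ f2 →
      bmLoopA f1 n bs i = bmLoopA f2 n bs i := by
  intro f1
  induction f1 with
  | zero =>
    intro f2 n i h1 _
    rw [bmLoopA_nil 0 n bs i (by omega), bmLoopA_nil f2 n bs i (by omega)]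
  | succ f ih =>
    intro f2 n i h1 h2
    by_cases hi : i < n
    · obtain ⟨f2', rfl⟩ : ∃ k, f2 = k + 1 := ⟨f2 - 1, by omega⟩
      rw [bmLoopA, bmLoopA, if_pos hi, if_pos hi, ih f2' n (i + bs) (by omega) (by omega)]
    · rw [bmLoopA_nil _ _ _ _ (by omega), bmLoopA_nil _ _ _ _ (by omega)]

lemma bmLoopA_shift (d : Int) :
    ∀ (fuel : Nat) (n bs i : Int),
      bmLoopA fuel (n + d) bs (i + d) = (bmLoopA fuel n bs i).map (fun p => (p.1 + d, p.2 + d)) := by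
  intro fuel
  induction fuel with
  | zero => intro n bs i; simp [bmLoopA]
  | succ f ih =>
    intro n bs i
    by_cases hi : i < n
    · rw [bmLoopA, bmLoopA, if_pos (by omega : i + d < n + d), if_pos hi]
      have h1 : i + d + bs = (i + bs) + d := by ring
      rw [h1, ih, List.map_cons]
      have h2 : min (i + bs + d) (n + d) = min (i + bs) n + d := by omega
      simp [h2]
    · rw [bmLoopA, bmLoopA, if_neg (by omega : ¬ i + d < n + d), if_neg hi, List.map_nil]

lemma bmLoopA_nonneg (bs : Int) (hbs : 0 ≤ bs) :
    ∀ (fuel : Nat) (n i : Int), 0 ≤ i → ∀ p ∈ bmLoopA fuel n bs i, 0 ≤ p.1 ∧ 0 ≤ p.2 := by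
  intro fuel
  induction fuel with
  | zero => intro n i _ p hp; simp [bmLoopA] at hp
  | succ f ih =>
    intro n i hi p hp
    rw [bmLoopA] at hp
    by_cases hin : i < n
    · rw [if_pos hin, List.mem_cons] at hp
      rcases hp with rfl | hp
      · exact ⟨hi, by simp; omega⟩
      · exact ih n (i + bs) (by omega) p hp
    · rw [if_neg hin] at hp; simp at hp

lemma slice_shift {α : Type} (xs : List α) (d : Nat) (a b : Int) (ha : 0 ≤ a) (hb : 0 ≤ b) :
    PySem.List.slice xs (some (a + (d : Int))) (some (b + (d : Int))) =
      PySem.List.slice (xs.drop d) (some a) (some b) := by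
  rw [PySem.List.slice_toNat _ (by omega) (by omega), PySem.List.slice_toNat _ ha hb,
    List.drop_drop]
  have h1 : (a + (d : Int)).toNat = a.toNat + d := by omega
  have h2 : (b + (d : Int)).toNat - (a.toNat + d) = b.toNat - a.toNat := by omega
  rw [h1, h2, Nat.add_comm a.toNat d]

lemma bmChunks_nil (bs : Int) (fuel : Nat) : bmChunks bs fuel [] = [] := by
  cases fuel <;> rfl

lemma bmChunks_fuel (bs : Int) (hbs : 2 ≤ bs) :
    ∀ (f1 f2 : Nat) (xs : List (List (String × String))), xs.length ≤ f1 → xs.length ≤ f2 →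
      bmChunks bs f1 xs = bmChunks bs f2 xs := by
  intro f1
  induction f1 with
  | zero =>
    intro f2 xs h1 _
    have : xs = [] := List.eq_nil_of_length_eq_zero (by omega)
    rw [this, bmChunks_nil, bmChunks_nil]
  | succ f ih =>
    intro f2 xs h1 h2
    cases xs with
    | nil => rw [bmChunks_nil, bmChunks_nil]
    | cons x t =>
      simp only [List.length_cons] at h1 h2
      obtain ⟨f2', rfl⟩ : ∃ k, f2 = k + 1 := ⟨f2 - 1, by omega⟩
      show (let chunk := PySem.List.slice (x :: t) none (some bs)
            let rest' := PySem.List.slice (x :: t) (some bs) none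
            if (rest'.length : Int) = 1 then
              [chunk, PySem.List.slice chunk (some 1) none ++ rest']
            else chunk :: bmChunks bs f rest') =
           (let chunk := PySem.List.slice (x :: t) none (some bs)
            let rest' := PySem.List.slice (x :: t) (some bs) none
            if (rest'.length : Int) = 1 then
              [chunk, PySem.List.slice chunk (some 1) none ++ rest']
            else chunk :: bmChunks bs f2' rest')
      simp only
      split
      · rfl
      · have hlen : (PySem.List.slice (x :: t) (some bs) none).length ≤ t.length := by
          rw [PySem.List.slice_from _ (by omega : (0:Int) ≤ bs), List.length_drop]
          simp only [List.length_cons]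
          omega
        rw [ih f2' _ (le_trans hlen (by omega)) (le_trans hlen (by omega))]

lemma chunks_eq_aux (bs : Int) (hbs : 2 ≤ bs) :
    ∀ (N : Nat) (xs : List (List (String × String))), xs.length ≤ N →
      (bmPatch (xs.length : Int) bs (bmLoopA xs.length (xs.length : Int) bs 0)).map
        (fun p => PySem.List.slice xs (some p.1) (some p.2))
      = bmChunks bs xs.length xs := by
  intro N
  induction N with
  | zero =>
    intro xs h
    have hx : xs = [] := List.eq_nil_of_length_eq_zero (by omega)
    subst hx
    simp [bmLoopA, bmPatch, bmChunks_nil]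
  | succ N ih =>
    intro xs hlen
    cases xs with
    | nil => simp [bmLoopA, bmPatch, bmChunks_nil]
    | cons x t =>
      simp only [List.length_cons] at hlen
      have hbs0 : (0:Int) < bs := by omega
      set n : Int := (((x :: t).length : Nat) : Int) with hn
      have hn' : n = (t.length : Int) + 1 := by simp [hn]
      have hstep : bmLoopA (x :: t).length n bs 0 =
          (0, min bs n) :: bmLoopA t.length n bs bs := by
        show bmLoopA (t.length + 1) n bs 0 = _
        rw [bmLoopA, if_pos (by omega : (0:Int) < n)]
        norm_num
      set rest' : List (List (String × String)) := (x :: t).drop bs.toNat with hrest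
      have hr1 : PySem.List.slice (x :: t) (some bs) none = rest' :=
        PySem.List.slice_from _ (le_of_lt hbs0)
      by_cases hcase : n ≤ bs
      · -- a single chunk covers everything
        have htail : bmLoopA t.length n bs bs = [] := bmLoopA_nil _ _ _ _ hcase
        have hrnil : rest' = [] := by
          rw [hrest]
          apply List.drop_eq_nil_of_le
          simp only [List.length_cons]
          omega
        have hLHS : (bmPatch n bs (bmLoopA (x :: t).length n bs 0)).map
            (fun p => PySem.List.slice (x :: t) (some p.1) (some p.2)) =
            [PySem.List.slice (x :: t) none (some bs)] := by
          rw [hstep, htail, min_eq_right hcase, bmPatch, if_neg (by simp)]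
          simp only [List.map_cons, List.map_nil]
          have e1 : PySem.List.slice (x :: t) none (some n) = x :: t := by
            rw [PySem.List.slice_to _ (by omega : (0:Int) ≤ n)]
            exact List.take_of_length_le (by simp only [List.length_cons]; omega)
          have e2 : PySem.List.slice (x :: t) none (some bs) = x :: t := by
            rw [PySem.List.slice_to _ (by omega : (0:Int) ≤ bs)]
            exact List.take_of_length_le (by simp only [List.length_cons]; omega)
          rw [PySem.List.slice_zero_start, e1, e2]
        rw [hLHS]
        show _ =
          (let chunk := PySem.List.slice (x :: t) none (some bs)
           let r := PySem.List.slice (x :: t) (some bs) none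
           if ((r.length : Nat) : Int) = 1 then
             [chunk, PySem.List.slice chunk (some 1) none ++ r]
           else chunk :: bmChunks bs t.length r)
        simp only [hr1, hrnil]
        rw [if_neg (by simp), bmChunks_nil]
      · -- at least one full chunk is peeled off
        rw [not_le] at hcase
        have hminbs : min bs n = bs := min_eq_left (by omega)
        set m : Int := n - bs with hm
        have hm1 : 1 ≤ m := by omega
        have hrlen : ((rest'.length : Nat) : Int) = m := by
          have h0 : rest'.length = (x :: t).length - bs.toNat := by
            rw [hrest, List.length_drop]
          simp only [List.length_cons] at h0
          omega
        have hfuel : bmLoopA t.length n bs bs = bmLoopA rest'.length n bs bs :=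
          bmLoopA_fuel bs hbs0 _ _ n bs (by omega) (by omega)
        have hshift : bmLoopA rest'.length n bs bs =
            (bmLoopA rest'.length m bs 0).map (fun p => (p.1 + bs, p.2 + bs)) := by
          have h := bmLoopA_shift bs rest'.length m bs 0
          rw [zero_add] at h
          rw [show m + bs = n from by omega] at h
          exact h
        set boundsT := bmLoopA rest'.length m bs 0 with hT
        obtain ⟨f', hf'⟩ : ∃ k, rest'.length = k + 1 := ⟨rest'.length - 1, by omega⟩
        have hTcons : boundsT = (0, min bs m) :: bmLoopA f' m bs bs := by
          rw [hT, hf', bmLoopA, if_pos (by omega : (0:Int) < m)]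
          norm_num
        have hTne : boundsT ≠ [] := by rw [hTcons]; simp
        by_cases hm2 : m = 1
        · -- exactly one element would remain: A patches the final boundary,
          -- B emits the overlapping tail batch
          have htail2 : bmLoopA f' m bs bs = [] := bmLoopA_nil _ _ _ _ (by omega)
          have hminbm : min bs m = 1 := by rw [hm2]; exact min_eq_right (by omega)
          have hTval : boundsT = [(0, 1)] := by rw [hTcons, htail2, hminbm]
          rw [hstep, hminbs, hfuel, hshift, hTval]
          simp only [List.map_cons, List.map_nil]
          rw [bmPatch, if_pos (by
            refine ⟨by simp, ?_⟩
            simp only [List.getLastD_cons, List.getLastD_nil]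
            ring)]
          have hdrop : ((0, bs) :: [((0:Int) + bs, 1 + bs)]).dropLast = [(0, bs)] := rfl
          rw [hdrop, List.map_append, List.map_cons, List.map_nil, List.map_cons, List.map_nil]
          have e1 : PySem.List.slice (x :: t) (some (n - bs)) (some n) = t := by
            rw [show n - bs = (1:Int) from by omega,
              PySem.List.slice_toNat _ (by omega : (0:Int) ≤ 1) (by omega : (0:Int) ≤ n)]
            show (List.drop 1 (x :: t)).take (n.toNat - 1) = t
            rw [show List.drop 1 (x :: t) = t from rfl]
            exact List.take_of_length_le (by omega)
          have e2 : PySem.List.slice (PySem.List.slice (x :: t) none (some bs)) (some 1) none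
              ++ rest' = t := by
            rw [PySem.List.slice_from _ (by omega : (0:Int) ≤ 1),
              PySem.List.slice_to _ (le_of_lt hbs0), hrest]
            obtain ⟨j, hj⟩ : ∃ j, bs.toNat = j + 1 := ⟨bs.toNat - 1, by omega⟩
            rw [hj, List.take_succ_cons, List.drop_succ_cons]
            show (x :: List.take j t).drop 1 ++ List.drop j t = t
            rw [show (x :: List.take j t).drop 1 = List.take j t from rfl]
            exact List.take_append_drop j t
          rw [e1, PySem.List.slice_zero_start]
          show _ =
            (let chunk := PySem.List.slice (x :: t) none (some bs)
             let r := PySem.List.slice (x :: t) (some bs) none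
             if ((r.length : Nat) : Int) = 1 then
               [chunk, PySem.List.slice chunk (some 1) none ++ r]
             else chunk :: bmChunks bs t.length r)
          simp only [hr1]
          rw [if_pos (by omega), e2]
          rfl
        · -- at least two elements remain: recurse
          have hmlen2 : 2 ≤ m := by omega
          have hlen2T : 2 ≤ boundsT.length ∨ boundsT = [(0, min bs m)] := by
            cases hE : bmLoopA f' m bs bs with
            | nil => right; rw [hTcons, hE]
            | cons a l => left; rw [hTcons, hE]; simp only [List.length_cons]; omega
          have hq : boundsT.getLast? = some (boundsT.getLastD (0, 0)) := by
            rw [List.getLastD_eq_getLast?]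
            cases h : boundsT.getLast? with
            | none => exact absurd (List.getLast?_eq_none_iff.mp h) hTne
            | some v => rfl
          have hlastmap : (boundsT.map (fun p => (p.1 + bs, p.2 + bs))).getLastD (0, bs) =
              ((boundsT.getLastD (0, 0)).1 + bs, (boundsT.getLastD (0, 0)).2 + bs) := by
            rw [List.getLastD_eq_getLast?, List.getLast?_map, hq]
            rfl
          have hbslt : 2 ≤ boundsT.length → bs < m := by
            intro h2
            by_contra hh
            rw [not_lt] at hh
            rw [hTcons, bmLoopA_nil f' m bs bs hh] at h2
            simp at h2
          have hpatch : bmPatch n bs ((0, bs) :: boundsT.map (fun p => (p.1 + bs, p.2 + bs))) =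
              (0, bs) :: (bmPatch m bs boundsT).map (fun p => (p.1 + bs, p.2 + bs)) := by
            by_cases hq1 : (boundsT.getLastD (0, 0)).2 - (boundsT.getLastD (0, 0)).1 = 1
            · have hTlen2 : 2 ≤ boundsT.length := by
                rcases hlen2T with h | h
                · exact h
                · exfalso
                  rw [h] at hq1
                  simp only [List.getLastD_cons, List.getLastD_nil] at hq1
                  have h2m : (2:Int) ≤ min bs m := le_min hbs hmlen2
                  omega
              have hcondF : 2 ≤ ((0, bs) :: boundsT.map (fun p => (p.1 + bs, p.2 + bs))).length ∧
                  ((((0, bs) :: boundsT.map (fun p => (p.1 + bs, p.2 + bs))).getLastD (0, 0)).2 -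
                    (((0, bs) :: boundsT.map (fun p => (p.1 + bs, p.2 + bs))).getLastD (0, 0)).1) = 1 := by
                constructor
                · simp only [List.length_cons, List.length_map]; omega
                · rw [List.getLastD_cons, hlastmap]; omega
              rw [bmPatch, bmPatch, if_pos hcondF, if_pos ⟨hTlen2, hq1⟩,
                List.dropLast_cons_of_ne_nil (by simp [hTne] :
                  boundsT.map (fun p => (p.1 + bs, p.2 + bs)) ≠ [])]
              rw [List.map_append,
                show (List.map (fun p => (p.1 + bs, p.2 + bs)) boundsT).dropLast =
                  List.map (fun p => (p.1 + bs, p.2 + bs)) boundsT.dropLast from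
                  List.map_dropLast.symm,
                show List.map (fun p => (p.1 + bs, p.2 + bs)) [(m - bs, m)] = [(n - bs, n)] from by
                  simp only [List.map_cons, List.map_nil]
                  rw [show m - bs + bs = n - bs from by omega, show m + bs = n from by omega]]
              rfl
            · rw [bmPatch, bmPatch, if_neg, if_neg]
              · rintro ⟨_, h⟩; exact hq1 h
              · rintro ⟨_, h⟩
                rw [List.getLastD_cons, hlastmap] at h
                exact hq1 (by omega)
          have hmem : ∀ p ∈ bmPatch m bs boundsT, 0 ≤ p.1 ∧ 0 ≤ p.2 := by
            intro p hp
            rw [bmPatch] at hp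
            split_ifs at hp with hc
            · rcases List.mem_append.mp hp with h | h
              · refine bmLoopA_nonneg bs (by omega) rest'.length m 0 le_rfl p ?_
                rw [← hT]
                exact List.mem_of_mem_dropLast h
              · have hbm : bs < m := hbslt hc.1
                simp at h
                rw [h]
                constructor <;> simp <;> omega
            · exact bmLoopA_nonneg bs (by omega) rest'.length m 0 le_rfl p (hT ▸ hp)
          have ihr := ih rest' (by omega)
          rw [hrlen, ← hT] at ihr
          rw [hstep, hminbs, hfuel, hshift, hpatch, List.map_cons, List.map_map]
          have htailmap : ((bmPatch m bs boundsT).map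
              ((fun p => PySem.List.slice (x :: t) (some p.1) (some p.2)) ∘
                (fun p => (p.1 + bs, p.2 + bs)))) =
              (bmPatch m bs boundsT).map (fun p => PySem.List.slice rest' (some p.1) (some p.2)) := by
            apply List.map_congr_left
            intro p hp
            obtain ⟨h1, h2⟩ := hmem p hp
            simp only [Function.comp]
            rw [show (bs : Int) = ((bs.toNat : Nat) : Int) from by omega,
              slice_shift (x :: t) bs.toNat p.1 p.2 h1 h2, ← hrest]
          rw [htailmap, ihr, PySem.List.slice_zero_start]
          show _ =
            (let chunk := PySem.List.slice (x :: t) none (some bs)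
             let r := PySem.List.slice (x :: t) (some bs) none
             if ((r.length : Nat) : Int) = 1 then
               [chunk, PySem.List.slice chunk (some 1) none ++ r]
             else chunk :: bmChunks bs t.length r)
          simp only [hr1]
          rw [if_neg (by omega)]
          rw [bmChunks_fuel bs hbs rest'.length t.length rest' le_rfl (by omega)]

-- ===== VERDICT (by name: the statement is the Claim_ definition above) =====
theorem batch_messages_py_spec : Claim_equal_batch_messages_py := by
  intro messages bs _ hpre
  unfold Spec_batch_messages_py batch_messages_py batch_messages_py_alt
  by_cases h1 : (messages.length : Int) < 2
  · simp [h1]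
  by_cases h2 : bs ≤ 0
  · simp [h1, h2]
  by_cases h3 : bs < 2
  · exact absurd ⟨by omega, by omega⟩ hpre
  simp only [if_neg h1, if_neg h2, if_neg h3]
  exact chunks_eq_aux bs (by omega) messages.length messages le_rfl
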